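-- pv_equiv track=rewrite | github.com/shaoboly/ql_copy_network | data_reading/cnndm_read.py | abstract2sents
-- ===== SOURCE A (Python) =====
-- def abstract2sents(abstract: str):
--     """Splits abstract text from datafile into list of sentences.
--
--     Args:
--       abstract: string containing <s> and </s> tags for starts and ends of sentences
--
--     Returns:
--       sents: List of sentence strings (no tags)"""
--     SENTENCE_START = '<s>'
--     SENTENCE_END = '</s>'
--     cur = 0
--     sents = []
--     while True:
--         try:
--             start_p = abstract.index(SENTENCE_START, cur)
--             end_p = abstract.index(SENTENCE_END, start_p + 1)
--             cur = end_p + len(SENTENCE_END)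
--             sents.append(abstract[start_p + len(SENTENCE_START):end_p])
--         except ValueError:  # no more sntences
--             return sents
-- ===== SOURCE B (Python) =====
-- def abstract2sents(abstract: str):
--     """Single left-to-right scan: a two-state machine (outside / inside a sentence)
--     that opens on '<s>', accumulates characters, and emits on '</s>'."""
--     sents = []
--     buf = None  # None = outside a sentence; list of chars = inside
--     i = 0
--     n = len(abstract)
--     while i < n:
--         if buf is None:
--             if abstract.startswith('<s>', i):
--                 buf = []
--                 i += 3
--             else:
--                 i += 1
--         else:
--             if abstract.startswith('</s>', i):
--                 sents.append(''.join(buf))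
--                 buf = None
--                 i += 4
--             else:
--                 buf.append(abstract[i])
--                 i += 1
--     return sents
-- ===== Notes on version B (the rewrite author's own statement) =====
-- stated objective: alternative
-- what changed: Replaced A's cursor-plus-str.index/try-except loop with a single left-to-right two-state character scanner (outside/inside a sentence) that opens on '<s>', accumulates characters, and emits on '</s>'.
import Mathlib
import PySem

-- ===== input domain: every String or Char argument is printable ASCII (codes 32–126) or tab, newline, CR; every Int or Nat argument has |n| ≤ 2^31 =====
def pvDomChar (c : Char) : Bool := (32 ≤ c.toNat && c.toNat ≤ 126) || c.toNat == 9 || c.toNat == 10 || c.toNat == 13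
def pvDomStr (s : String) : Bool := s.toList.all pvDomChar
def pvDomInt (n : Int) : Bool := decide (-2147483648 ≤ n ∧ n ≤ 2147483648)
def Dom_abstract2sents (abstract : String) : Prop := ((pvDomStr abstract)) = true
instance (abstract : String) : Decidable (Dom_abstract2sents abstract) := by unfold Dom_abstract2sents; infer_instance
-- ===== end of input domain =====

-- B replaces A's cursor-and-index loop by a single-pass two-state scanner; objective: alternative (same cost).

-- ===== PORT A =====

-- hand port of str.index(sub, start) for 0 ≤ start and nonempty sub, exact:
-- returns the first index i ≥ start at which sub is a prefix of the suffix, none = ValueError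
def pvFindAux (l : List Char) (nd : List Char) : Option Nat :=
  match l with
  | [] => none
  | _ :: t => if nd.isPrefixOf l then some 0 else (pvFindAux t nd).map (· + 1)

def pvIndex (hay : List Char) (nd : List Char) (start : Nat) : Option Nat :=
  (pvFindAux (hay.drop start) nd).map (· + start)

theorem pvFindAux_some {l nd : List Char} {i : Nat} (h : pvFindAux l nd = some i) :
    nd.isPrefixOf (l.drop i) = true ∧ i + nd.length ≤ l.length := by
  induction l generalizing i with
  | nil => simp [pvFindAux] at h
  | cons c t ih =>
    rw [pvFindAux] at h
    split at h
    · rename_i hp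
      cases h
      refine ⟨hp, ?_⟩
      have := (List.isPrefixOf_iff_prefix.mp hp).length_le
      simpa using this
    · rcases Option.map_eq_some_iff.mp h with ⟨j, hj, rfl⟩
      have := ih hj
      simp only [List.drop_succ_cons, List.length_cons]
      exact ⟨this.1, by omega⟩

-- the while-True loop of A: cur advances past each matched </s>
def pvLoopA (abs : List Char) (cur : Nat) : List String :=
  match h1 : pvIndex abs ['<','s','>'] cur with
  | none => []
  | some sp =>
    match h2 : pvIndex abs ['<','/','s','>'] (sp + 1) with
    | none => []
    | some ep =>
      -- abstract[sp+3:ep] : in-range nonnegative slice, drop/take is exact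
      ((abs.drop (sp + 3)).take (ep - (sp + 3))).asString :: pvLoopA abs (ep + 4)
termination_by abs.length + 1 - cur
decreasing_by
  rcases Option.map_eq_some_iff.mp h1 with ⟨i, hi, hsp⟩
  rcases Option.map_eq_some_iff.mp h2 with ⟨j, hj, hep⟩
  have H1 := pvFindAux_some hi
  have H2 := pvFindAux_some hj
  have hcur : cur < abs.length := by
    by_contra hc
    rw [List.drop_eq_nil_of_le (by omega)] at hi
    simp [pvFindAux] at hi
  simp only [List.length_drop] at H1 H2
  omega

def abstract2sents (abstract : String) : List String :=
  pvLoopA abstract.toList 0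

-- ===== PORT B =====

-- single pass, two states: scanOut = outside a sentence (buf is None),
-- scanIn = inside (buf = chars collected so far); end of string discards an open buf
mutual
def pvScanOut : List Char → List String
  | [] => []
  | c :: t =>
    if ['<','s','>'].isPrefixOf (c :: t) then pvScanIn (List.drop 3 (c :: t)) []
    else pvScanOut t
termination_by l => l.length
decreasing_by all_goals (simp [List.length_drop]; try omega)

def pvScanIn : List Char → List Char → List String
  | [], _ => []
  | c :: t, buf =>
    if ['<','/','s','>'].isPrefixOf (c :: t) then buf.asString :: pvScanOut (List.drop 4 (c :: t))
    else pvScanIn t (buf ++ [c])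
termination_by l _ => l.length
decreasing_by all_goals (simp [List.length_drop]; try omega)
end

def abstract2sents_alt (abstract : String) : List String :=
  pvScanOut abstract.toList

-- ===== PRECONDITION & SPEC =====
def Spec_abstract2sents (abstract : String) (out : List String) : Prop := out = abstract2sents_alt abstract
instance (abstract : String) (out : List String) : Decidable (Spec_abstract2sents abstract out) := by unfold Spec_abstract2sents; infer_instance

-- ===== CLAIM (what is proved, stated in full; the proofs are below) =====
def Claim_equal_abstract2sents : Prop := ∀ (abstract : String), Dom_abstract2sents abstract → Spec_abstract2sents abstract (abstract2sents abstract)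

-- ===== LEMMAS AND PROOFS =====

theorem scanOut_eq (l : List Char) :
    pvScanOut l = match pvFindAux l ['<','s','>'] with
      | none => []
      | some i => pvScanIn (l.drop (i + 3)) [] := by
  induction l with
  | nil => simp [pvScanOut, pvFindAux]
  | cons c t ih =>
    rw [pvScanOut, pvFindAux]
    split
    · rfl
    · rw [ih]
      cases h : pvFindAux t ['<','s','>'] with
      | none => simp
      | some j => simp [List.drop_succ_cons]

theorem scanIn_eq (l : List Char) (buf : List Char) :
    pvScanIn l buf = match pvFindAux l ['<','/','s','>'] with
      | none => []
      | some j => (buf ++ l.take j).asString :: pvScanOut (l.drop (j + 4)) := by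
  induction l generalizing buf with
  | nil => simp [pvScanIn, pvFindAux]
  | cons c t ih =>
    rw [pvScanIn, pvFindAux]
    split
    · simp
    · rw [ih]
      cases h : pvFindAux t ['<','/','s','>'] with
      | none => simp
      | some j => simp [List.drop_succ_cons]

theorem scanOut_none {l : List Char} (h : pvFindAux l ['<','s','>'] = none) :
    pvScanOut l = [] := by rw [scanOut_eq, h]

theorem scanOut_some {l : List Char} {i : Nat} (h : pvFindAux l ['<','s','>'] = some i) :
    pvScanOut l = pvScanIn (l.drop (i + 3)) [] := by rw [scanOut_eq, h]

theorem scanIn_none {l buf : List Char} (h : pvFindAux l ['<','/','s','>'] = none) :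
    pvScanIn l buf = [] := by rw [scanIn_eq, h]

theorem scanIn_some {l buf : List Char} {j : Nat} (h : pvFindAux l ['<','/','s','>'] = some j) :
    pvScanIn l buf = (buf ++ l.take j).asString :: pvScanOut (l.drop (j + 4)) := by
  rw [scanIn_eq, h]

theorem findAux_not_head {c : Char} {t nd : List Char} {d : Char} (hd : nd = d :: nd.tail)
    (hne : c ≠ d) : pvFindAux (c :: t) nd = (pvFindAux t nd).map (· + 1) := by
  rw [pvFindAux]
  split
  · rename_i hp
    rw [hd] at hp
    simp [List.isPrefixOf] at hp
    exact absurd hp.1.symm hne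
  · rfl

theorem loopA_eq1 {abs : List Char} {cur : Nat}
    (h : pvIndex abs ['<','s','>'] cur = none) : pvLoopA abs cur = [] := by
  rw [pvLoopA.eq_def]
  split
  · rfl
  · rename_i sp heq; rw [h] at heq; simp at heq

theorem loopA_eq2 {abs : List Char} {cur sp : Nat}
    (h1 : pvIndex abs ['<','s','>'] cur = some sp)
    (h2 : pvIndex abs ['<','/','s','>'] (sp + 1) = none) : pvLoopA abs cur = [] := by
  rw [pvLoopA.eq_def]
  split
  · rename_i heq; rw [h1] at heq
  · rename_i sp' heq
    rw [h1] at heq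
    injection heq with heq
    subst heq
    split
    · rfl
    · rename_i ep' heq2; rw [h2] at heq2; simp at heq2

theorem loopA_eq3 {abs : List Char} {cur sp ep : Nat}
    (h1 : pvIndex abs ['<','s','>'] cur = some sp)
    (h2 : pvIndex abs ['<','/','s','>'] (sp + 1) = some ep) :
    pvLoopA abs cur =
      ((abs.drop (sp + 3)).take (ep - (sp + 3))).asString :: pvLoopA abs (ep + 4) := by
  rw [pvLoopA.eq_def]
  split
  · rename_i heq; rw [h1] at heq; simp at heq
  · rename_i sp' heq
    rw [h1] at heq
    injection heq with heq
    subst heq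
    split
    · rename_i heq2; rw [h2] at heq2; simp at heq2
    · rename_i ep' heq2
      rw [h2] at heq2
      injection heq2 with heq2
      subst heq2
      rfl

-- decompose the suffix at a matched '<s>'
theorem tagS_decomp {abs : List Char} {p : Nat}
    (h : List.isPrefixOf ['<','s','>'] (abs.drop p) = true) :
    ∃ t, abs.drop p = '<' :: 's' :: '>' :: t ∧ abs.drop (p + 3) = t ∧
      abs.drop (p + 1) = 's' :: '>' :: t := by
  rcases List.isPrefixOf_iff_prefix.mp h with ⟨t, ht⟩
  have hA : abs.drop p = '<' :: 's' :: '>' :: t := by simpa using ht.symm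
  refine ⟨t, hA, ?_, ?_⟩
  · rw [← List.drop_drop, hA]; rfl
  · rw [← List.drop_drop, hA]; rfl

theorem loopA_eq_scanOut (abs : List Char) :
    ∀ cur : Nat, pvLoopA abs cur = pvScanOut (abs.drop cur) := by
  intro cur0
  refine pvLoopA.induct abs (fun cur => pvLoopA abs cur = pvScanOut (abs.drop cur))
    ?_ ?_ ?_ cur0
  · -- no '<s>' from cur: both empty
    intro cur h1
    have hn : pvFindAux (abs.drop cur) ['<','s','>'] = none := by
      cases h : pvFindAux (abs.drop cur) ['<','s','>'] with
      | none => rfl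
      | some j => exfalso; simp [pvIndex, h] at h1
    rw [loopA_eq1 h1, scanOut_none hn]
  · -- '<s>' found, no '</s>' after it: both empty
    intro cur sp h1 h2
    rcases Option.map_eq_some_iff.mp h1 with ⟨i, hi, hsp⟩
    subst hsp
    rw [show i + cur = cur + i by omega] at h1 h2
    have hpre := (pvFindAux_some hi).1
    rw [List.drop_drop] at hpre
    rcases tagS_decomp hpre with ⟨t, _, hB, hdrop1⟩
    have h2' : pvFindAux (abs.drop (cur + i + 1)) ['<','/','s','>'] = none := by
      simpa [pvIndex] using h2
    have hfe : pvFindAux (abs.drop (cur + i + 1)) ['<','/','s','>'] =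
        ((pvFindAux t ['<','/','s','>']).map (· + 1)).map (· + 1) := by
      rw [hdrop1, findAux_not_head rfl (by decide), findAux_not_head rfl (by decide)]
    have ht : pvFindAux t ['<','/','s','>'] = none := by
      cases h : pvFindAux t ['<','/','s','>'] with
      | none => rfl
      | some j => rw [h, h2'] at hfe; simp at hfe
    rw [loopA_eq2 h1 h2, scanOut_some hi, List.drop_drop,
        show cur + (i + 3) = cur + i + 3 by omega, hB, scanIn_none ht]
  · -- '<s>' and '</s>' both found: one sentence emitted, continue after the tag
    intro cur sp h1 ep h2 ih
    rcases Option.map_eq_some_iff.mp h1 with ⟨i, hi, hsp⟩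
    subst hsp
    rw [show i + cur = cur + i by omega] at h1 h2
    rcases Option.map_eq_some_iff.mp h2 with ⟨m, hm, hep⟩
    have hpre := (pvFindAux_some hi).1
    rw [List.drop_drop] at hpre
    rcases tagS_decomp hpre with ⟨t, _, hB, hdrop1⟩
    have hfe : pvFindAux (abs.drop (cur + i + 1)) ['<','/','s','>'] =
        ((pvFindAux t ['<','/','s','>']).map (· + 1)).map (· + 1) := by
      rw [hdrop1, findAux_not_head rfl (by decide), findAux_not_head rfl (by decide)]
    rw [hm] at hfe
    cases hj : pvFindAux t ['<','/','s','>'] with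
    | none => rw [hj] at hfe; simp at hfe
    | some j =>
      rw [hj] at hfe
      simp only [Option.map_some, Option.some.injEq] at hfe
      rw [loopA_eq3 h1 h2, scanOut_some hi, List.drop_drop,
          show cur + (i + 3) = cur + i + 3 by omega, hB, scanIn_some hj,
          show ep - (cur + i + 3) = j by omega,
          show t.drop (j + 4) = abs.drop (ep + 4) by
            rw [← hB, List.drop_drop]; congr 1; omega,
          ih]
      simp

-- ===== VERDICT (by name: the statement is the Claim_ definition above) =====
theorem abstract2sents_spec : Claim_equal_abstract2sents := by
  intro abstract _
  unfold Spec_abstract2sents abstract2sents abstract2sents_alt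
  rw [loopA_eq_scanOut]
  simp
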